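-- pv_equiv track=rewrite | github.com/bloomberg/chromium.bb | pnacl/driver/driver_log.py | PrettyStringify
-- ===== SOURCE A (Python) =====
-- def PrettyStringify(args):
--   ret = ''
--   grouping = 0
--   for a in args:
--     if grouping == 0 and len(ret) > 0:
--       ret += " \\\n    "
--     elif grouping > 0:
--       ret += " "
--     if grouping == 0:
--       grouping = 1
--       if a.startswith('-') and len(a) == 2:
--         grouping = 2
--     ret += a
--     grouping -= 1
--   return ret
-- ===== SOURCE B (Python) =====
-- def PrettyStringify(args):
--   # Two-phase: group short flags with their following value, then fold the
--   # groups together with the continuation separator (skipped while the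
--   # accumulator is still empty, as A does).
--   groups = []
--   i = 0
--   n = len(args)
--   while i < n:
--     a = args[i]
--     if a.startswith('-') and len(a) == 2 and i + 1 < n:
--       groups.append(a + ' ' + args[i + 1])
--       i += 2
--     else:
--       groups.append(a)
--       i += 1
--   out = ''
--   for g in groups:
--     if len(out) > 0:
--       out += " \\\n    "
--     out += g
--   return out
-- ===== Notes on version B (the rewrite author's own statement) =====
-- stated objective: simpler
-- what changed: A's single-pass state machine with a 'grouping' countdown counter is replaced by a two-phase decomposition: an index-advancing pass that pairs each two-character '-x' flag with its following argument into a list of group strings, then a fold that joins the groups with the continuation separator.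
import Mathlib
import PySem

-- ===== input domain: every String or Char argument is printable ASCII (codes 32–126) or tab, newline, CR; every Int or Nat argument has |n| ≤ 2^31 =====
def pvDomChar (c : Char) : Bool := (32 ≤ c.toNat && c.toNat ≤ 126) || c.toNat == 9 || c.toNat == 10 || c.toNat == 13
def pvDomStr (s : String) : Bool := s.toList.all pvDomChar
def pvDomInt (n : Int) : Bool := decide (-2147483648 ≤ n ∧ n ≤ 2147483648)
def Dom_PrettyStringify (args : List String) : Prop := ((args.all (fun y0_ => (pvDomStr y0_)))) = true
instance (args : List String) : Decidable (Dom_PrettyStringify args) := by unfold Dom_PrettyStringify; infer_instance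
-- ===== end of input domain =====

-- B replaces A's grouping-counter state machine by a group-then-join decomposition (same cost).

-- ===== PORT A =====
-- literal transliteration of A's loop: state (ret, grouping)
def PrettyStringifyStep (st : String × Int) (a : String) : String × Int :=
  let ret := st.1
  let grouping := st.2
  let ret :=
    if grouping = 0 ∧ PySem.Str.len ret > 0 then ret ++ " \\\n    "
    else if grouping > 0 then ret ++ " " else ret
  let grouping :=
    if grouping = 0 then
      (if PySem.Str.startswith a "-" = true ∧ PySem.Str.len a = 2 then 2 else 1)
    else grouping
  (ret ++ a, grouping - 1)

def PrettyStringify (args : List String) : String :=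
  (args.foldl PrettyStringifyStep ("", (0 : Int))).1

-- ===== PORT B =====
-- phase 1 of Source B: the index-advancing while loop building `groups`
def pvGroupsB : List String → List String
  | [] => []
  | [a] => [a]
  | a :: b :: rest =>
    if PySem.Str.startswith a "-" = true ∧ PySem.Str.len a = 2 then
      (a ++ " " ++ b) :: pvGroupsB rest
    else a :: pvGroupsB (b :: rest)

-- phase 2 of Source B: fold the groups with the continuation separator
def pvJoinStepB (out g : String) : String :=
  (if PySem.Str.len out > 0 then out ++ " \\\n    " else out) ++ g

def PrettyStringify_alt (args : List String) : String :=
  (pvGroupsB args).foldl pvJoinStepB ""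

-- ===== PRECONDITION & SPEC =====
def Spec_PrettyStringify (args : List String) (out : String) : Prop := out = PrettyStringify_alt args
instance (args : List String) (out : String) : Decidable (Spec_PrettyStringify args out) := by unfold Spec_PrettyStringify; infer_instance

-- ===== CLAIM (what is proved, stated in full; the proofs are below) =====
def Claim_equal_PrettyStringify : Prop := ∀ (args : List String), Dom_PrettyStringify args → Spec_PrettyStringify args (PrettyStringify args)

-- ===== LEMMAS AND PROOFS =====
-- one step of A's loop from grouping = 0: emit the separator rule of pvJoinStepB and
-- set grouping to 1 exactly when a is a two-character '-x' flag
theorem stepA_zero (ret a : String) :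
    PrettyStringifyStep (ret, (0 : Int)) a =
      (pvJoinStepB ret a,
       if PySem.Str.startswith a "-" = true ∧ PySem.Str.len a = 2 then 1 else 0) := by
  simp only [PrettyStringifyStep, pvJoinStepB]
  split_ifs <;> simp_all

-- one step of A's loop from grouping = 1: a plain space, back to grouping = 0
theorem stepA_one (ret a : String) :
    PrettyStringifyStep (ret, (1 : Int)) a = (ret ++ " " ++ a, 0) := by
  simp only [PrettyStringifyStep]
  split_ifs <;> simp_all

-- invariant: from grouping = 0, A's fold over args equals B's join-fold over the groups of args
theorem foldA_eq_join (args : List String) : ∀ (ret : String),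
    (args.foldl PrettyStringifyStep (ret, (0 : Int))).1
      = (pvGroupsB args).foldl pvJoinStepB ret := by
  induction args using pvGroupsB.induct with
  | case1 => intro ret; simp [pvGroupsB]
  | case2 a =>
    intro ret
    simp only [pvGroupsB, List.foldl]
    rw [stepA_zero]
  | case3 a b rest hflag ih =>
    intro ret
    have e1 : pvGroupsB (a :: b :: rest) = (a ++ " " ++ b) :: pvGroupsB rest := by
      simp only [pvGroupsB]; rw [if_pos hflag]
    rw [e1]
    simp only [List.foldl]
    rw [stepA_zero, if_pos hflag, stepA_one, ih]
    congr 1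
    simp [pvJoinStepB, String.append_assoc]
  | case4 a b rest hflag ih =>
    intro ret
    have e1 : pvGroupsB (a :: b :: rest) = a :: pvGroupsB (b :: rest) := by
      simp only [pvGroupsB]; rw [if_neg hflag]
    rw [e1]
    simp only [List.foldl]
    rw [stepA_zero, if_neg hflag, ← List.foldl_cons, ih]

-- ===== VERDICT (by name: the statement is the Claim_ definition above) =====
theorem PrettyStringify_spec : Claim_equal_PrettyStringify := by
  intro args _
  unfold Spec_PrettyStringify PrettyStringify PrettyStringify_alt
  exact foldA_eq_join args ""
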